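-- pv_equiv track=rewrite | github.com/joncannon/Autism-TAP-project | Code/Analyze data/EEG/Bin_scripts_descriptions/bin_maker.py | bin_maker_2
-- ===== SOURCE A (Python) =====
-- def bin_maker_2(arr):
--     # sort arr of cloze values and find cutoffs div1 and div2
--     arr_sorted = sorted(arr)
--     div1, div2 = arr_sorted[len(arr)//3], arr_sorted[(len(arr)*2)//3]
--     low = "bin 1\nlowest third\n.{"
--     mid = "bin 2\nmiddle third\n.{"
--     top = "bin 3\ntop third\n.{"
--     # create the bins: e.g. low = lowest cloze values
--     for i in range(len(arr_sorted)):
--         if arr[i] < div1: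
--             low += str((i+1)*1000) + ";"
--         elif arr[i] >= div2:
--             top += str((i+1)*1000) + ";"
--         else:
--             mid += str((i+1)*1000) + ";"
--     low = low[:-1] + "}"
--     mid = mid[:-1] + "}"
--     top = top[:-1] + "}"
--     return low + "\n\n" + mid + "\n\n" + top
-- ===== SOURCE B (Python) =====
-- def _kth(xs, k):
--     # quickselect (middle pivot, three-way partition): k-th smallest, 0-based
--     p = xs[len(xs) // 2]
--     lt = [v for v in xs if v < p]
--     eq = [v for v in xs if v == p]
--     if k < len(lt):
--         return _kth(lt, k)
--     if k < len(lt) + len(eq):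
--         return p
--     return _kth([v for v in xs if v > p], k - len(lt) - len(eq))
--
--
-- def bin_maker_2(arr):
--     n = len(arr)
--     div1 = _kth(arr, n // 3)
--     div2 = _kth(arr, (n * 2) // 3)
--     lows, mids, tops = [], [], []
--     for i, v in enumerate(arr):
--         (lows if v < div1 else tops if v >= div2 else mids).append(str((i + 1) * 1000))
--     def fmt(head, items):
--         part = head + "".join(s + ";" for s in items)
--         return part[:-1] + "}"
--     return (fmt("bin 1\nlowest third\n.{", lows) + "\n\n"
--             + fmt("bin 2\nmiddle third\n.{", mids) + "\n\n"
--             + fmt("bin 3\ntop third\n.{", tops))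
-- ===== Notes on version B (the rewrite author's own statement) =====
-- stated objective: alternative
-- what changed: B replaces A's full sort by a three-way quickselect (_kth) that extracts only the two tertile cutoffs, and collects the bin entries in three lists joined once at the end instead of growing three strings.
-- outside the precondition, e.g. on bin_maker_2([]): A raises IndexError, B raises IndexError
import Mathlib
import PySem

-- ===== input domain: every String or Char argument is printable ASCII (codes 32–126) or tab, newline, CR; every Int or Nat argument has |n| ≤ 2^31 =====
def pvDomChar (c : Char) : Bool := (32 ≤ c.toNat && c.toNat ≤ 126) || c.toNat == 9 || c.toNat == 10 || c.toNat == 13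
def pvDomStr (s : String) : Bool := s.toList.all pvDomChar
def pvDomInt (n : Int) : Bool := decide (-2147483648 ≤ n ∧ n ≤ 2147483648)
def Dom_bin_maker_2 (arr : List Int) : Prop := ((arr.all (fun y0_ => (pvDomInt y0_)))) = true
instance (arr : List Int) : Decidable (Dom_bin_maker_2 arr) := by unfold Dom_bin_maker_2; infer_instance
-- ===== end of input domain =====

-- B replaces A's full sort by a three-way quickselect of the two tertile cutoffs and collects
-- the bin entries in three lists joined at the end (objective: alternative algorithm).

-- ===== PORT A =====
-- the loop body of A: accumulate directly into the three bin strings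
def aStep (div1 div2 : Int) (st : String × String × String) (iv : Int × Int) : String × String × String :=
  if iv.2 < div1 then (st.1 ++ PySem.Int.toStr ((iv.1 + 1) * 1000) ++ ";", st.2.1, st.2.2)
  else if iv.2 ≥ div2 then (st.1, st.2.1, st.2.2 ++ PySem.Int.toStr ((iv.1 + 1) * 1000) ++ ";")
  else (st.1, st.2.1 ++ PySem.Int.toStr ((iv.1 + 1) * 1000) ++ ";", st.2.2)

def bin_maker_2 (arr : List Int) : String :=
  let arr_sorted := PySem.List.sorted arr (fun x => x) false
  match PySem.List.pyGet? arr_sorted (PySem.Int.floordiv (arr.length : Int) 3),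
        PySem.List.pyGet? arr_sorted (PySem.Int.floordiv ((arr.length : Int) * 2) 3) with
  | some div1, some div2 =>
    let st := (PySem.List.enumerate arr 0).foldl (aStep div1 div2)
      ("bin 1\nlowest third\n.{", "bin 2\nmiddle third\n.{", "bin 3\ntop third\n.{")
    (PySem.Str.slice st.1 none (some (-1)) ++ "}") ++ "\n\n" ++
    (PySem.Str.slice st.2.1 none (some (-1)) ++ "}") ++ "\n\n" ++
    (PySem.Str.slice st.2.2 none (some (-1)) ++ "}")
  | _, _ => ""   -- IndexError on the empty list: excluded by Pre_

-- ===== PORT B =====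
-- quickselect: k-th smallest (0-based), middle pivot, three-way partition (port of _kth)
-- termination helper for kthSel (cited by its decreasing_by)
theorem filter_attach_lt_length {a : Type} (xs : List a) (f : {x // x ∈ xs} → Bool)
    (x : a) (hx : x ∈ xs) (hf : f ⟨x, hx⟩ = false) :
    ((xs.attach.filter f).unattach).length < xs.length := by
  rw [List.length_unattach]
  calc (xs.attach.filter f).length < xs.attach.length :=
        List.length_filter_lt_length_iff_exists.2 ⟨⟨x, hx⟩, List.mem_attach _ _, by simp [hf]⟩
    _ = xs.length := List.length_attach

def kthSel (xs : List Int) (k : Nat) : Int :=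
  if hx : xs = [] then 0   -- unreachable under the recursion's invariant (xs[len//2] would raise)
  else
    have hlen : xs.length / 2 < xs.length :=
      Nat.div_lt_self (List.length_pos_of_ne_nil hx) (by omega)
    let p := xs[xs.length / 2]
    let lt := xs.filter (fun v => decide (v < p))
    let eqc := xs.filter (fun v => decide (v = p))
    if k < lt.length then kthSel lt k
    else if k < lt.length + eqc.length then p
    else kthSel (xs.filter (fun v => decide (p < v))) (k - lt.length - eqc.length)
  termination_by xs.length
  decreasing_by
  all_goals exact filter_attach_lt_length _ _ p (List.getElem_mem hlen) (by simp [p])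

-- ''.join(s + ';' for s in items)
def altRender (items : List String) : String :=
  PySem.Str.join "" (items.map (fun s => s ++ ";"))

-- fmt(head, items): head already carries the '.{'
def altFmt (head : String) (items : List String) : String :=
  PySem.Str.slice (head ++ altRender items) none (some (-1)) ++ "}"

-- the loop body of B: accumulate the entry strings into three lists
def bStep (div1 div2 : Int) (st : List String × List String × List String) (iv : Int × Int) :
    List String × List String × List String :=
  if iv.2 < div1 then (st.1 ++ [PySem.Int.toStr ((iv.1 + 1) * 1000)], st.2.1, st.2.2)
  else if iv.2 ≥ div2 then (st.1, st.2.1, st.2.2 ++ [PySem.Int.toStr ((iv.1 + 1) * 1000)])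
  else (st.1, st.2.1 ++ [PySem.Int.toStr ((iv.1 + 1) * 1000)], st.2.2)

def bin_maker_2_alt (arr : List Int) : String :=
  let n := arr.length
  let div1 := kthSel arr (n / 3)
  let div2 := kthSel arr (n * 2 / 3)
  let st := (PySem.List.enumerate arr 0).foldl (bStep div1 div2) ([], [], [])
  altFmt "bin 1\nlowest third\n.{" st.1 ++ "\n\n" ++
  altFmt "bin 2\nmiddle third\n.{" st.2.1 ++ "\n\n" ++
  altFmt "bin 3\ntop third\n.{" st.2.2

-- ===== PRECONDITION & SPEC =====
-- Pre_ excludes only the empty list, on which A raises IndexError (arr_sorted[0] of []).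
def Pre_bin_maker_2 (arr : List Int) : Prop := arr ≠ []
instance (arr : List Int) : Decidable (Pre_bin_maker_2 arr) := by unfold Pre_bin_maker_2; infer_instance
def pvWitness_bin_maker_2 : List Int := ([3, 1, 2, 2, 5, 9])

def Spec_bin_maker_2 (arr : List Int) (out : String) : Prop := out = bin_maker_2_alt arr
instance (arr : List Int) (out : String) : Decidable (Spec_bin_maker_2 arr out) := by unfold Spec_bin_maker_2; infer_instance

-- ===== CLAIM (what is proved, stated in full; the proofs are below) =====
def Claim_equal_bin_maker_2 : Prop := ∀ (arr : List Int), Dom_bin_maker_2 arr → Pre_bin_maker_2 arr → Spec_bin_maker_2 arr (bin_maker_2 arr)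

-- ===== LEMMAS AND PROOFS =====

-- join with empty separator distributes over appending one more part
theorem chars_join_nil_append (ps : List (List Char)) (q : List Char) :
    PySem.Chars.join [] (ps ++ [q]) = PySem.Chars.join [] ps ++ q := by
  induction ps with
  | nil => simp [PySem.Chars.join_singleton, PySem.Chars.join_nil]
  | cons p ps ih =>
    cases ps with
    | nil => simp [PySem.Chars.join_cons_cons, PySem.Chars.join_singleton]
    | cons r rs =>
      simp only [List.cons_append, PySem.Chars.join_cons_cons] at *
      rw [ih]
      simp [List.append_assoc]

-- quickselect computes the k-th element of Python's sorted list
theorem kthSel_correct (n : Nat) : ∀ (xs : List Int), xs.length ≤ n → ∀ (k : Nat), k < xs.length →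
    (PySem.List.sorted xs (fun x => x) false)[k]? = some (kthSel xs k) := by
  induction n with
  | zero => intro xs hle k hk; omega
  | succ n ih =>
    intro xs hle k hk
    have hx : xs ≠ [] := by intro h; simp [h] at hk
    have hlen : xs.length / 2 < xs.length :=
      Nat.div_lt_self (List.length_pos_of_ne_nil hx) (by omega)
    set p := xs[xs.length / 2] with hp
    have hpmem : p ∈ xs := List.getElem_mem hlen
    set lt := xs.filter (fun v => decide (v < p)) with hlt
    set eqc := xs.filter (fun v => decide (v = p)) with heqc
    set gt := xs.filter (fun v => decide (p < v)) with hgt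
    have hall_lt : ∀ y ∈ lt, y < p := by
      intro y hy; simpa using (List.mem_filter.1 hy).2
    have hall_eq : ∀ y ∈ eqc, y = p := by
      intro y hy; simpa using (List.mem_filter.1 hy).2
    have hall_gt : ∀ y ∈ gt, p < y := by
      intro y hy; simpa using (List.mem_filter.1 hy).2
    have hperm : (lt ++ (eqc ++ gt)).Perm xs := by
      rw [List.perm_iff_count]
      intro a
      simp only [List.count_append]
      rcases lt_trichotomy a p with h | h | h
      · have h1 : List.count a lt = List.count a xs :=
          List.count_filter (by simp [h])
        have h2 : List.count a eqc = 0 :=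
          List.count_eq_zero.2 (fun hm => by have := hall_eq a hm; omega)
        have h3 : List.count a gt = 0 :=
          List.count_eq_zero.2 (fun hm => by have := hall_gt a hm; omega)
        omega
      · have h1 : List.count a lt = 0 :=
          List.count_eq_zero.2 (fun hm => by have := hall_lt a hm; omega)
        have h2 : List.count a eqc = List.count a xs :=
          List.count_filter (by simp [h])
        have h3 : List.count a gt = 0 :=
          List.count_eq_zero.2 (fun hm => by have := hall_gt a hm; omega)
        omega
      · have h1 : List.count a lt = 0 :=
          List.count_eq_zero.2 (fun hm => by have := hall_lt a hm; omega)
        have h2 : List.count a eqc = 0 :=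
          List.count_eq_zero.2 (fun hm => by have := hall_eq a hm; omega)
        have h3 : List.count a gt = List.count a xs :=
          List.count_filter (by simp [h])
        omega
    have hperm' : (PySem.List.sorted lt (fun x => x) false ++
        (eqc ++ PySem.List.sorted gt (fun x => x) false)).Perm xs :=
      ((PySem.List.sorted_perm lt (fun x => x) false).append
        (List.Perm.refl eqc |>.append (PySem.List.sorted_perm gt (fun x => x) false))).trans hperm
    have hsorted : PySem.List.sorted xs (fun x => x) false =
        PySem.List.sorted lt (fun x => x) false ++
          (eqc ++ PySem.List.sorted gt (fun x => x) false) := by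
      refine PySem.List.sorted_id_eq_of_perm_of_pairwise xs _ hperm' ?_
      rw [List.pairwise_append]
      refine ⟨PySem.List.sorted_pairwise lt (fun x => x), ?_, ?_⟩
      · rw [List.pairwise_append]
        refine ⟨List.pairwise_of_forall_mem_list
            (fun a ha b hb => by rw [hall_eq a ha, hall_eq b hb]),
          PySem.List.sorted_pairwise gt (fun x => x), ?_⟩
        intro a ha b hb
        have hb' : b ∈ gt := (PySem.List.mem_sorted _ _ _ _).1 hb
        have := hall_gt b hb'
        rw [hall_eq a ha]; omega
      · intro a ha b hb
        have ha' : a ∈ lt := (PySem.List.mem_sorted _ _ _ _).1 ha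
        have halt := hall_lt a ha'
        rcases List.mem_append.1 hb with hb | hb
        · have := hall_eq b hb; omega
        · have := hall_gt b ((PySem.List.mem_sorted _ _ _ _).1 hb); omega
    have hlens : lt.length + (eqc.length + gt.length) = xs.length := by
      simpa using hperm.length_eq
    have hltlen : lt.length < xs.length :=
      List.length_filter_lt_length_iff_exists.2 ⟨p, hpmem, by simp⟩
    have hgtlen : gt.length < xs.length :=
      List.length_filter_lt_length_iff_exists.2 ⟨p, hpmem, by simp⟩
    rw [hsorted, kthSel, dif_neg hx]
    simp only [← hp, ← hlt, ← heqc, ← hgt]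
    split_ifs with h1 h2
    · rw [List.getElem?_append_left (by simpa [PySem.List.length_sorted] using h1)]
      exact ih lt (by omega) k h1
    · rw [List.getElem?_append_right (by simpa [PySem.List.length_sorted] using h1),
          List.getElem?_append_left (by simp [PySem.List.length_sorted]; omega)]
      have hk2 : k - lt.length < eqc.length := by omega
      rw [List.getElem?_eq_getElem (by simpa [PySem.List.length_sorted] using hk2)]
      exact congrArg some (hall_eq _ (List.getElem_mem _))
    · rw [List.getElem?_append_right (by simpa [PySem.List.length_sorted] using h1),
          List.getElem?_append_right (by simp [PySem.List.length_sorted]; omega)]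
      have := ih gt (by omega) (k - lt.length - eqc.length) (by omega)
      simpa [PySem.List.length_sorted, Nat.sub_sub] using this

-- the two folds are related: A's strings are the prefixes plus the rendered B-lists
theorem altRender_append (l : List String) (e : String) :
    altRender (l ++ [e]) = altRender l ++ (e ++ ";") := by
  rw [← String.toList_inj]
  simp only [altRender, PySem.Str.toList_join, List.map_append, List.map_map,
    String.toList_append]
  simpa using chars_join_nil_append (List.map (String.toList ∘ fun s => s ++ ";") l)
    (e ++ ";").toList

theorem fold_rel (d1 d2 : Int) (l : List (Int × Int)) (s1 s2 s3 : String) (l1 l2 l3 : List String) :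
    l.foldl (aStep d1 d2) (s1 ++ altRender l1, s2 ++ altRender l2, s3 ++ altRender l3)
      = (s1 ++ altRender (l.foldl (bStep d1 d2) (l1, l2, l3)).1,
         s2 ++ altRender (l.foldl (bStep d1 d2) (l1, l2, l3)).2.1,
         s3 ++ altRender (l.foldl (bStep d1 d2) (l1, l2, l3)).2.2) := by
  induction l generalizing l1 l2 l3 with
  | nil => rfl
  | cons hd tl ih =>
    have hre : ∀ (s : String) (lx : List String) (e : String),
        s ++ altRender lx ++ e ++ ";" = s ++ altRender (lx ++ [e]) := by
      intro s lx e
      rw [altRender_append, ← String.append_assoc, ← String.append_assoc]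
    simp only [List.foldl_cons, aStep, bStep]
    split_ifs with h1 h2
    · rw [hre]; exact ih _ _ _
    · rw [hre]; exact ih _ _ _
    · rw [hre]; exact ih _ _ _

-- ===== VERDICT (by name: the statement is the Claim_ definition above) =====
theorem bin_maker_2_spec : Claim_equal_bin_maker_2 := by
  intro arr _ hpre
  unfold Spec_bin_maker_2
  have hn : 0 < arr.length := List.length_pos_of_ne_nil hpre
  have hd1 : PySem.Int.floordiv (arr.length : Int) 3 = ((arr.length / 3 : Nat) : Int) := by
    exact_mod_cast PySem.Int.floordiv_natCast arr.length 3
  have hd2 : PySem.Int.floordiv ((arr.length : Int) * 2) 3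
      = ((arr.length * 2 / 3 : Nat) : Int) := by
    have hc : ((arr.length : Int) * 2) = ((arr.length * 2 : Nat) : Int) := by push_cast; ring
    rw [hc]; exact_mod_cast PySem.Int.floordiv_natCast (arr.length * 2) 3
  have hg1 : PySem.List.pyGet? (PySem.List.sorted arr (fun x => x) false)
      (PySem.Int.floordiv (arr.length : Int) 3) = some (kthSel arr (arr.length / 3)) := by
    rw [hd1, PySem.List.pyGet?_natCast]
    exact kthSel_correct arr.length arr le_rfl _ (by omega)
  have hg2 : PySem.List.pyGet? (PySem.List.sorted arr (fun x => x) false)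
      (PySem.Int.floordiv ((arr.length : Int) * 2) 3)
      = some (kthSel arr (arr.length * 2 / 3)) := by
    rw [hd2, PySem.List.pyGet?_natCast]
    exact kthSel_correct arr.length arr le_rfl _ (by omega)
  have hren : altRender [] = "" := by
    rw [← String.toList_inj]
    simp [altRender, PySem.Str.toList_join, PySem.Chars.join_nil]
  have hfold := fold_rel (kthSel arr (arr.length / 3)) (kthSel arr (arr.length * 2 / 3))
    (PySem.List.enumerate arr 0)
    "bin 1\nlowest third\n.{" "bin 2\nmiddle third\n.{" "bin 3\ntop third\n.{" [] [] []
  simp only [hren, String.append_empty] at hfold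
  simp only [bin_maker_2, hg1, hg2, hfold, bin_maker_2_alt, altFmt]
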